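-- pv_equiv track=rewrite | github.com/wawiesel/wks | wks/priority.py | count_leading_underscores
-- ===== SOURCE A (Python) =====
-- def count_leading_underscores(name: str) -> int:
--     """Count leading underscores in a name.
--
--     Args:
--         name: Path component name
--
--     Returns:
--         Number of leading underscores (0 if none)
--     """
--     count = 0
--     for char in name:
--         if char == "_":
--             count += 1
--         else:
--             break
--     return count
-- ===== SOURCE B (Python) =====
-- def count_leading_underscores(name: str) -> int:
--     """Count leading underscores in a name."""
--     return len(name) - len(name.lstrip("_"))
-- ===== Notes on version B (the rewrite author's own statement) =====
-- stated objective: idiomatic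
-- what changed: Replaces the explicit count-and-break loop with the standard length difference between the name and its underscore-left-stripped form.
import Mathlib
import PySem

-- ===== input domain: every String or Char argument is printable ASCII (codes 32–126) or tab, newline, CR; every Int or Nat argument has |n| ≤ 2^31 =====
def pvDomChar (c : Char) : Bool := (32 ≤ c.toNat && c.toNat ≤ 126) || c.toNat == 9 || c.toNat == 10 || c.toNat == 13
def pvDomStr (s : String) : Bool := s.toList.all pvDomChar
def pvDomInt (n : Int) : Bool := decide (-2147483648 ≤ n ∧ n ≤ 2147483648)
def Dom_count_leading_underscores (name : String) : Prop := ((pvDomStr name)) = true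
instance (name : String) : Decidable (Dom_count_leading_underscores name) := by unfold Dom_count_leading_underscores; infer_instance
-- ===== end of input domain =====

-- B replaces A's count-and-break loop with the idiomatic length difference len(name) - len(name.lstrip("_")).


-- ===== PORT A =====
-- the 'for char in name: if char == "_": count += 1 else: break' loop, as structural recursion with the running count
def cluA_loop (cs : List Char) (count : Int) : Int :=
  match cs with
  | [] => count
  | c :: rest => if c = '_' then cluA_loop rest (count + 1) else count

def count_leading_underscores (name : String) : Int :=
  cluA_loop name.toList 0

-- ===== PORT B =====
-- len(name) - len(name.lstrip("_")); lstrip("_") drops exactly the leading '_' chars, ported as dropWhile (exact)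
def count_leading_underscores_alt (name : String) : Int :=
  (name.toList.length : Int) - ((name.toList.dropWhile (· = '_')).length : Int)

-- ===== PRECONDITION & SPEC =====
def Spec_count_leading_underscores (name : String) (out : Int) : Prop := out = count_leading_underscores_alt name
instance (name : String) (out : Int) : Decidable (Spec_count_leading_underscores name out) := by unfold Spec_count_leading_underscores; infer_instance

-- ===== CLAIM (what is proved, stated in full; the proofs are below) =====
def Claim_equal_count_leading_underscores : Prop := ∀ (name : String), Dom_count_leading_underscores name → Spec_count_leading_underscores name (count_leading_underscores name)

-- ===== LEMMAS AND PROOFS =====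
theorem cluA_loop_eq (cs : List Char) (count : Int) :
    cluA_loop cs count = count + (cs.length : Int) - ((cs.dropWhile (· = '_')).length : Int) := by
  induction cs generalizing count with
  | nil => simp [cluA_loop]
  | cons c rest ih =>
    by_cases h : c = '_'
    · simp [cluA_loop, h, ih]; ring
    · simp [cluA_loop, h, List.dropWhile]

-- ===== VERDICT (by name: the statement is the Claim_ definition above) =====
theorem count_leading_underscores_spec : Claim_equal_count_leading_underscores := by
  intro name _
  show _ = _
  rw [count_leading_underscores, cluA_loop_eq, count_leading_underscores_alt]
  ring
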